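-- pv_equiv track=rewrite | github.com/bulaya-ute/HandwrittenTextRecognition | sandbox.py | is_rectangles_close
-- ===== SOURCE A (Python) =====
-- def is_rectangles_close(rect1, rect2, threshold=5):
--     x1, y1, w1, h1, _ = rect1
--     x2, y2, w2, h2, _ = rect2
--
--     x_min, x_max = x1 - threshold, x1 + w1 + threshold
--     y_min, y_max = y1 - threshold, y1 + h1 + threshold
--
--     corners = [(x2, y2), (x2 + w2, y2), (x2, y2 + h2), (x2 + w2, y2 + h2)]
--     for x, y in corners:
--         if x_min <= x <= x_max:
--             if y_min <= y <= y_max: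
--                 return True
--     return False
-- ===== SOURCE B (Python) =====
-- def is_rectangles_close(rect1, rect2, threshold=5):
--     # Per-axis decomposition: the corners are the cross product
--     # {x2, x2+w2} x {y2, y2+h2}, so "some corner inside the padded box"
--     # splits into independent x and y membership tests.
--     x1, y1, w1, h1, _ = rect1
--     x2, y2, w2, h2, _ = rect2
--     x_ok = (x1 - threshold <= x2 <= x1 + w1 + threshold) or \
--            (x1 - threshold <= x2 + w2 <= x1 + w1 + threshold)
--     y_ok = (y1 - threshold <= y2 <= y1 + h1 + threshold) or \
--            (y1 - threshold <= y2 + h2 <= y1 + h1 + threshold)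
--     return x_ok and y_ok
-- ===== Notes on version B (the rewrite author's own statement) =====
-- stated objective: simpler
-- what changed: Replaces the corner list and early-return loop by two independent per-axis interval-membership tests combined with AND, exploiting that the four corners form the cross product {x2,x2+w2}x{y2,y2+h2}.
import Mathlib
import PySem

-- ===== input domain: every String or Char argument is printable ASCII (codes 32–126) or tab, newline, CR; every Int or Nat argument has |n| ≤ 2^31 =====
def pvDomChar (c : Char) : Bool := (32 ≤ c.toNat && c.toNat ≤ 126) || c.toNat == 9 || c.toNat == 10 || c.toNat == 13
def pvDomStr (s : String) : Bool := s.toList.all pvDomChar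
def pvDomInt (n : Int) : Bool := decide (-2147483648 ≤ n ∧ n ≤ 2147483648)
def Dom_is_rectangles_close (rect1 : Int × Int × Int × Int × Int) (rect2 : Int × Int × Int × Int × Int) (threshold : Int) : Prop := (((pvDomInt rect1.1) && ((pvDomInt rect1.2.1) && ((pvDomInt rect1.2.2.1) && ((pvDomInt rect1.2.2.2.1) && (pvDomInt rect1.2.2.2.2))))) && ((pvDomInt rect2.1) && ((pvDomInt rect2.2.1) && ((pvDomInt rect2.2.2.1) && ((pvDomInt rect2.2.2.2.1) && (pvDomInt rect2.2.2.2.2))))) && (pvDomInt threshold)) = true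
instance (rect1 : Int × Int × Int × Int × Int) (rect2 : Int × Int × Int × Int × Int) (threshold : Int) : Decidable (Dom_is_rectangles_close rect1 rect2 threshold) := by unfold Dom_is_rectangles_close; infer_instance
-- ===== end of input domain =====

-- ===== PORT A =====
-- Per-axis decomposition vs corner loop; equivalence proved below (objective: simpler B).
-- loop body of A: scan the corner list, returning true at the first corner inside the padded box
def pvScanCorners (xmin xmax ymin ymax : Int) : List (Int × Int) → Bool
  | [] => false
  | (x, y) :: rest =>
    if xmin ≤ x ∧ x ≤ xmax then
      if ymin ≤ y ∧ y ≤ ymax then true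
      else pvScanCorners xmin xmax ymin ymax rest
    else pvScanCorners xmin xmax ymin ymax rest

def is_rectangles_close (rect1 : Int × Int × Int × Int × Int) (rect2 : Int × Int × Int × Int × Int) (threshold : Int) : Bool :=
  match rect1, rect2 with
  | (x1, y1, w1, h1, _), (x2, y2, w2, h2, _) =>
    let x_min := x1 - threshold
    let x_max := x1 + w1 + threshold
    let y_min := y1 - threshold
    let y_max := y1 + h1 + threshold
    let corners := [(x2, y2), (x2 + w2, y2), (x2, y2 + h2), (x2 + w2, y2 + h2)]
    pvScanCorners x_min x_max y_min y_max corners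

-- ===== PORT B =====
def is_rectangles_close_alt (rect1 : Int × Int × Int × Int × Int) (rect2 : Int × Int × Int × Int × Int) (threshold : Int) : Bool :=
  match rect1, rect2 with
  | (x1, y1, w1, h1, _), (x2, y2, w2, h2, _) =>
    let x_ok := decide (x1 - threshold ≤ x2 ∧ x2 ≤ x1 + w1 + threshold) ||
                decide (x1 - threshold ≤ x2 + w2 ∧ x2 + w2 ≤ x1 + w1 + threshold)
    let y_ok := decide (y1 - threshold ≤ y2 ∧ y2 ≤ y1 + h1 + threshold) ||
                decide (y1 - threshold ≤ y2 + h2 ∧ y2 + h2 ≤ y1 + h1 + threshold)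
    x_ok && y_ok

-- ===== PRECONDITION & SPEC =====
def Spec_is_rectangles_close (rect1 : Int × Int × Int × Int × Int) (rect2 : Int × Int × Int × Int × Int) (threshold : Int) (out : Bool) : Prop := out = is_rectangles_close_alt rect1 rect2 threshold
instance (rect1 : Int × Int × Int × Int × Int) (rect2 : Int × Int × Int × Int × Int) (threshold : Int) (out : Bool) : Decidable (Spec_is_rectangles_close rect1 rect2 threshold out) := by unfold Spec_is_rectangles_close; infer_instance

-- ===== CLAIM (what is proved, stated in full; the proofs are below) =====
def Claim_equal_is_rectangles_close : Prop := ∀ (rect1 : Int × Int × Int × Int × Int) (rect2 : Int × Int × Int × Int × Int) (threshold : Int), Dom_is_rectangles_close rect1 rect2 threshold → Spec_is_rectangles_close rect1 rect2 threshold (is_rectangles_close rect1 rect2 threshold)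

-- ===== LEMMAS AND PROOFS =====

-- ===== VERDICT (by name: the statement is the Claim_ definition above) =====
theorem is_rectangles_close_spec : Claim_equal_is_rectangles_close := by
  intro rect1 rect2 threshold _
  obtain ⟨x1, y1, w1, h1, t1⟩ := rect1
  obtain ⟨x2, y2, w2, h2, t2⟩ := rect2
  show is_rectangles_close _ _ _ = is_rectangles_close_alt _ _ _
  simp only [is_rectangles_close, is_rectangles_close_alt, pvScanCorners]
  split_ifs <;> simp_all
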